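-- pv_equiv track=rewrite | github.com/GuilhermeXA/Treinando_Python | Treinando Python 31-08-2023_Exercícios Aula 5/Exercícios aula 5 - Lista 3/Problema D - Criptografia.py | criptografar
-- ===== SOURCE A (Python) =====
-- def criptografar(texto):
--     cripto_texto = ""
--
--     for char in texto:
--         if char.isalpha():
--             cripto_texto += chr(ord(char) + 3) if char.islower() else chr(ord(char) + 3).lower()
--         else:
--             cripto_texto += char
--
--     cripto_texto = cripto_texto[::-1]
--
--     meio = len(cripto_texto) // 2
--     for i in range(meio, len(cripto_texto)):
--         cripto_texto = cripto_texto[:i] + chr(ord(cripto_texto[i]) - 1) + cripto_texto[i + 1:]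
--
--     return cripto_texto
-- ===== SOURCE B (Python) =====
-- def criptografar(texto):
--     n = len(texto)
--     meio = n // 2
--     out = []
--     for i in range(n):
--         c = texto[n - 1 - i]
--         if c.isalpha():
--             c = chr(ord(c) + 3) if c.islower() else chr(ord(c) + 3).lower()
--         if i >= meio:
--             c = chr(ord(c) - 1)
--         out.append(c)
--     return ''.join(out)
-- ===== Notes on version B (the rewrite author's own statement) =====
-- stated objective: faster
-- what changed: B replaces A's three passes (build shifted string by repeated concatenation, reverse it, then a loop that rebuilds the whole string by slicing to decrement each second-half character) with a single indexed pass that reads texto[n-1-i], applies the shift, conditionally decrements when i >= n//2, and joins a list at the end.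
import Mathlib
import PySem

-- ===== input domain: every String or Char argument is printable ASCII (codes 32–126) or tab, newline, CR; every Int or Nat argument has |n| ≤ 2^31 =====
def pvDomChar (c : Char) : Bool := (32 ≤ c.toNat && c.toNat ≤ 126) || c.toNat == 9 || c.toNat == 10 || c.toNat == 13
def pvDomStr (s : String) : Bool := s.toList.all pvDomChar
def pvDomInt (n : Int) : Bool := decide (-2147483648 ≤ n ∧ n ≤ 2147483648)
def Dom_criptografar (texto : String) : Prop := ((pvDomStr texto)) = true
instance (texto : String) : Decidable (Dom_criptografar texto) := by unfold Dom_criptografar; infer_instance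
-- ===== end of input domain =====

-- B fuses A's three passes (shift, reverse, quadratic slice-rebuild decrement loop) into one
-- indexed pass appending to a list; same return value, O(n) instead of A's O(n^2).

-- chr(ord(char) + 3) if char.islower() else chr(ord(char) + 3).lower()   (guarded by isalpha) —
-- the per-character expression both Pythons share verbatim
def pyShiftChar (c : Char) : Char :=
  if PySem.Chars.isalpha c then
    if PySem.Chars.islower c then Char.ofNat (c.toNat + 3)
    else PySem.Chars.lowerChar (Char.ofNat (c.toNat + 3))
  else c

-- chr(ord(c) - 1)
def pyDecChar (c : Char) : Char := Char.ofNat (c.toNat - 1)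

-- ===== PORT A =====
def criptografar (texto : String) : String :=
  -- first loop: cripto_texto += …
  let cripto0 : List Char := texto.toList.foldl (fun acc ch => acc ++ [pyShiftChar ch]) []
  -- cripto_texto = cripto_texto[::-1]
  let cripto1 := cripto0.reverse
  -- meio = len(cripto_texto) // 2; for i in range(meio, len(cripto_texto)): rebuild by slices
  let n : Int := cripto1.length
  let meio : Int := PySem.Int.floordiv n 2
  let cripto2 := (PySem.List.pyRange meio n 1).foldl
    (fun s i =>
      PySem.List.slice s none (some i)
        ++ [pyDecChar (PySem.List.pyGetD s i ' ')]
        ++ PySem.List.slice s (some (i + 1)) none) cripto1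
  String.ofList cripto2

-- ===== PORT B =====
def criptografar_alt (texto : String) : String :=
  let cs := texto.toList
  let n : Int := cs.length
  let meio : Int := PySem.Int.floordiv n 2
  let out := (PySem.List.pyRange 0 n 1).foldl
    (fun acc i =>
      let c := PySem.List.pyGetD cs (n - 1 - i) ' '
      let c := pyShiftChar c
      let c := if meio ≤ i then pyDecChar c else c
      acc ++ [c]) []
  String.ofList out

-- ===== PRECONDITION & SPEC =====
def Spec_criptografar (texto : String) (out : String) : Prop := out = criptografar_alt texto
instance (texto : String) (out : String) : Decidable (Spec_criptografar texto out) := by unfold Spec_criptografar; infer_instance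

-- ===== CLAIM (what is proved, stated in full; the proofs are below) =====
def Claim_equal_criptografar : Prop := ∀ (texto : String), Dom_criptografar texto → Spec_criptografar texto (criptografar texto)

-- ===== LEMMAS AND PROOFS =====

-- A's decrement loop over range(a, n) maps pyDecChar over the suffix from a.
theorem decLoop_eq (k : Nat) : ∀ (a : Nat) (s : List Char), s.length - a = k →
    (PySem.List.pyRange (a : Int) (s.length : Int) 1).foldl
      (fun s i =>
        PySem.List.slice s none (some i)
          ++ [pyDecChar (PySem.List.pyGetD s i ' ')]
          ++ PySem.List.slice s (some (i + 1)) none) s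
    = s.take a ++ (s.drop a).map pyDecChar := by
  induction k with
  | zero =>
    intro a s h
    have ha : s.length ≤ a := by omega
    rw [PySem.List.pyRange_one_eq_nil (by exact_mod_cast ha)]
    simp [List.take_of_length_le ha, List.drop_of_length_le ha]
  | succ k ih =>
    intro a s h
    have ha : a < s.length := by omega
    rw [PySem.List.pyRange_one_cons (by exact_mod_cast ha)]
    simp only [List.foldl_cons]
    have hget : PySem.List.pyGetD s (a : Int) ' ' = s[a] :=
      PySem.List.pyGetD_eq_getElem s ' ' (by positivity) (by exact_mod_cast ha)
    have hcast : ((a : Int) + 1) = ((a + 1 : Nat) : Int) := by push_cast; ring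
    rw [hget, PySem.List.slice_to_natCast, hcast, PySem.List.slice_from_natCast]
    set s' : List Char := s.take a ++ [pyDecChar s[a]] ++ s.drop (a + 1) with hs'
    have hlen : s'.length = s.length := by
      simp [hs']; omega
    have := ih (a + 1) s' (by omega)
    rw [hlen] at this
    rw [this]
    have hlen1 : (s.take a ++ [pyDecChar s[a]]).length = a + 1 := by
      simp [List.length_take, Nat.min_eq_left (Nat.le_of_lt ha)]
    have htake : s'.take (a + 1) = s.take a ++ [pyDecChar s[a]] := by
      rw [hs', List.take_left' hlen1]
    have hdrop : s'.drop (a + 1) = s.drop (a + 1) := by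
      rw [hs', List.drop_left' hlen1]
    rw [htake, hdrop]
    simp only [List.map_drop]
    rw [List.drop_eq_getElem_cons (show a < (List.map pyDecChar s).length by simpa using ha),
      List.getElem_map]
    simp

-- both sides as explicit lists
theorem ports_agree (texto : String) : criptografar texto = criptografar_alt texto := by
  unfold criptografar criptografar_alt
  simp only [PySem.List.foldl_append_singleton_eq_map, List.nil_append]
  set cs := texto.toList with hcs
  set R : List Char := (cs.map pyShiftChar).reverse with hR
  have hlenR : R.length = cs.length := by simp [hR]
  have hmeio : PySem.Int.floordiv (R.length : Int) 2 = ((R.length / 2 : Nat) : Int) := by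
    exact_mod_cast PySem.Int.floordiv_natCast R.length 2
  -- A side: decrement loop
  have hA := decLoop_eq (R.length - R.length / 2) (R.length / 2) R rfl
  have hmeio2 : PySem.Int.floordiv ((cs.length : Int)) 2 = ((cs.length / 2 : Nat) : Int) := by
    exact_mod_cast PySem.Int.floordiv_natCast cs.length 2
  rw [hmeio, hA]
  simp only [hmeio2, hlenR]
  rw [show ((cs.length : Int)) = ((cs.length : Nat) : Int) from rfl, PySem.List.pyRange_zero_nat,
    List.map_map]
  apply congrArg
  apply List.ext_getElem
  · simp [hlenR]; omega
  · intro k hk1 hk2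
    simp only [List.getElem_map, List.getElem_range, Function.comp]
    have hkn : k < cs.length := by
      simp only [List.length_append, List.length_take, List.length_map, List.length_drop,
        hlenR] at hk1
      omega
    have hidx : PySem.List.pyGetD cs ((cs.length : Int) - 1 - (k : Int)) ' '
        = cs[cs.length - 1 - k]'(by omega) := by
      have h0 : (0 : Int) ≤ (cs.length : Int) - 1 - (k : Int) := by omega
      have h1 : (cs.length : Int) - 1 - (k : Int) < (cs.length : Int) := by omega
      rw [PySem.List.pyGetD_eq_getElem cs ' ' h0 h1]
      congr 1
      omega
    have hRk : ∀ (h : k < R.length), R[k] = pyShiftChar (cs[cs.length - 1 - k]'(by omega)) := by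
      intro h
      simp only [hR, List.getElem_reverse, List.length_map, List.getElem_map]
    have htl : (List.take (cs.length / 2) R).length = cs.length / 2 := by
      simp only [List.length_take, hlenR]
      omega
    by_cases hcase : ((cs.length / 2 : Nat) : Int) ≤ (k : Int)
    · have hk' : cs.length / 2 ≤ k := by exact_mod_cast hcase
      rw [if_pos hcase]
      rw [List.getElem_append_right (by rw [htl]; omega)]
      simp only [htl, List.getElem_map, List.getElem_drop]
      have hix : cs.length / 2 + (k - cs.length / 2) = k := by omega
      simp only [hix]
      rw [hidx, hRk (by omega)]
    · have hk' : k < cs.length / 2 := by omega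
      rw [if_neg hcase]
      rw [List.getElem_append_left (by rw [htl]; omega)]
      rw [List.getElem_take, hidx, hRk (by omega)]

-- ===== VERDICT (by name: the statement is the Claim_ definition above) =====
theorem criptografar_spec : Claim_equal_criptografar := by
  intro texto _
  unfold Spec_criptografar
  exact ports_agree texto
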